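-- pv_equiv track=rewrite | github.com/meslater1030/calcutor | calcutor/calcutor/scripts/clean_string.py | fix_decimals
-- ===== SOURCE A (Python) =====
-- def fix_decimals(input):
--     """Pyparsing will not accept floats that do not
--     have a placeholder in the ones spot so we add one.
--     """
--     if input[0] == '.':
--         input = '0' + input
--     for item in [('+.', '+0.'),
--                  ('*.', '*0.'),
--                  ('/.', '/0.'),
--                  ('-.', '-0.'),
--                  ('(.', '(0.'),
--                  (').', ')0.')]:
--         input = input.replace(item[0], item[1])
--     return input
-- ===== SOURCE B (Python) =====
-- def fix_decimals(input):
--     """Pyparsing will not accept floats that do not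
--     have a placeholder in the ones spot so we add one.
--     """
--     ops = "+*/-()"
--     out = []
--     prev = None
--     for ch in input:
--         if ch == '.' and (prev is None or prev in ops):
--             out.append('0')
--         out.append(ch)
--         prev = ch
--     return ''.join(out)
-- ===== Notes on version B (the rewrite author's own statement) =====
-- stated objective: alternative
-- what changed: Replaced the prepend-then-six-sequential-str.replace passes with a single left-to-right scan that inserts a zero before a dot that starts the string or follows an operator or parenthesis.
import Mathlib
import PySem

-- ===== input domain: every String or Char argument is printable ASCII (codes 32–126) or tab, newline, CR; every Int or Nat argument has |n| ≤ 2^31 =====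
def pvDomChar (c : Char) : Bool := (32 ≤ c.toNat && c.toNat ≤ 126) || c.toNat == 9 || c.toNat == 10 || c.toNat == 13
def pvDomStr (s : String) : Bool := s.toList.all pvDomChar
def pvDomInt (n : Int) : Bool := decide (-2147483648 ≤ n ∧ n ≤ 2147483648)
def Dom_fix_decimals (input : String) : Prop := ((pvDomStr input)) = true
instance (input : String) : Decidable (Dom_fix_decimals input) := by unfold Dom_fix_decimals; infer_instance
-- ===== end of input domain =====

-- B replaces A's prepend-then-six-sequential-str.replace passes by one left-to-right scan
-- inserting a zero before a dot that starts the string or follows an operator/parenthesis (alternative algorithm, one pass instead of seven).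

-- ===== PORT A =====
def fix_decimals (input : String) : String :=
  let input₁ := if PySem.Str.pyGet? input 0 = some '.' then "0" ++ input else input
  [("+.", "+0."), ("*.", "*0."), ("/.", "/0."), ("-.", "-0."), ("(.", "(0."), (").", ")0.")].foldl
    (fun s item => PySem.Str.replace s item.1 item.2) input₁

-- ===== PORT B =====
def fdOps : List Char := "+*/-()".toList

def fdCond (prev : Option Char) (ch : Char) : Bool :=
  ch == '.' && (prev.isNone || prev.elim false (fun p => fdOps.contains p))

def fdGo (prev : Option Char) : List Char → List Char
  | [] => []
  | ch :: t => (if fdCond prev ch then ['0', ch] else [ch]) ++ fdGo (some ch) t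

def fix_decimals_alt (input : String) : String := String.ofList (fdGo none input.toList)

-- ===== PRECONDITION & SPEC =====
-- A evaluates input[0], which raises IndexError on the empty string; that is the only input excluded.
def Pre_fix_decimals (input : String) : Prop := input ≠ ""
instance (input : String) : Decidable (Pre_fix_decimals input) := by unfold Pre_fix_decimals; infer_instance
def pvWitness_fix_decimals : String := ".5+.2"

def Spec_fix_decimals (input : String) (out : String) : Prop := out = fix_decimals_alt input
instance (input : String) (out : String) : Decidable (Spec_fix_decimals input out) := by unfold Spec_fix_decimals; infer_instance

-- ===== CLAIM (what is proved, stated in full; the proofs are below) =====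
def Claim_equal_fix_decimals : Prop := ∀ (input : String), Dom_fix_decimals input → Pre_fix_decimals input → Spec_fix_decimals input (fix_decimals input)
-- ===== LEMMAS AND PROOFS =====

-- one pass inserting '0' before '.' when the previous character is in S (no index-0 rule)
def gpass (S : List Char) (p : Option Char) : List Char → List Char
  | [] => []
  | a :: t =>
    (if a == '.' && p.elim false (fun x => S.contains x) then ['0', a] else [a]) ++ gpass S (some a) t

-- what one str.replace ("c.", "c0.") computes, as a two-lookahead scan
def rep (c : Char) : List Char → List Char
  | a :: b :: t => if a = c ∧ b = '.' then a :: '0' :: b :: rep c t else a :: rep c (b :: t)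
  | l => l

-- rep resumed knowing the previous character was c
def repC (c : Char) : List Char → List Char
  | [] => []
  | a :: t => if a = '.' then '0' :: a :: rep c t else rep c (a :: t)

theorem rep_cons (c a : Char) (t : List Char) :
    rep c (a :: t) = a :: (if a = c then repC c t else rep c t) := by
  cases t with
  | nil => cases h : decide (a = c) <;> simp_all [rep, repC]
  | cons b t' =>
    by_cases hac : a = c
    · subst hac
      by_cases hb : b = '.'
      · subst hb; simp [rep, repC]
      · simp [rep, repC, hb]
    · simp [rep, hac]

theorem gpass_cons_pos (S : List Char) (p : Option Char) (a : Char) (t : List Char)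
    (h : (a == '.' && p.elim false (fun x => S.contains x)) = true) :
    gpass S p (a :: t) = '0' :: a :: gpass S (some a) t := by
  simp only [gpass]
  rw [if_pos h]
  rfl

theorem gpass_cons_neg (S : List Char) (p : Option Char) (a : Char) (t : List Char)
    (h : (a == '.' && p.elim false (fun x => S.contains x)) = false) :
    gpass S p (a :: t) = a :: gpass S (some a) t := by
  simp only [gpass]
  rw [if_neg]
  · rfl
  · intro hx
    rw [h] at hx
    exact Bool.false_ne_true hx

theorem gpass_eq_rep (c : Char) (hc : c ≠ '.') :
    ∀ (l : List Char) (p : Option Char),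
      gpass [c] p l = if p = some c then repC c l else rep c l := by
  intro l
  induction l with
  | nil => intro p; simp [gpass, rep, repC]
  | cons a t ih =>
    intro p
    by_cases hp : p = some c
    · subst hp
      by_cases ha : a = '.'
      · subst ha
        rw [gpass_cons_pos _ _ _ _ (by simp)]
        rw [ih (some '.'), if_neg (by simp [Ne.symm hc]), if_pos rfl]
        simp [repC]
      · rw [gpass_cons_neg _ _ _ _ (by simp [ha])]
        rw [ih (some a), if_pos rfl]
        rw [show repC c (a :: t) = rep c (a :: t) by simp [repC, ha]]
        rw [rep_cons]
        by_cases hac : a = c <;> simp [hac]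
    · have hcond : (a == '.' && (Option.elim p false (fun x => [c].contains x))) = false := by
        cases p with
        | none => simp
        | some x =>
          have hx : x ≠ c := fun h => hp (by rw [h])
          simp [hx]
      rw [gpass_cons_neg _ _ _ _ hcond, ih (some a), if_neg hp, rep_cons]
      by_cases hac : a = c <;> simp [hac]

theorem go_eq_rep (c : Char) :
    ∀ (fuel : Nat) (l acc : List Char), l.length ≤ fuel →
      PySem.Chars.replace.go [c, '.'] [c, '0', '.'] fuel l acc = acc.reverse ++ rep c l := by
  intro fuel
  induction fuel with
  | zero =>
    intro l acc h
    have : l = [] := by cases l <;> simp_all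
    subst this
    rw [PySem.Chars.replace.go.eq_def]
    simp [rep]
  | succ n ih =>
    intro l acc h
    cases l with
    | nil => rw [PySem.Chars.replace.go.eq_def]; simp [rep]
    | cons a t =>
      rw [PySem.Chars.replace.go.eq_def]
      by_cases hpre : List.isPrefixOf [c, '.'] (a :: t) = true
      · simp only [hpre]
        obtain ⟨r, hr⟩ := List.isPrefixOf_iff_prefix.mp hpre
        have ht : a :: t = c :: '.' :: r := hr.symm
        rw [ht]
        have hlen : r.length ≤ n := by
          have h' := h
          rw [ht] at h'
          simp only [List.length_cons] at h'
          omega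
        have hdrop : List.drop (List.length [c, '.']) (c :: '.' :: r) = r := by simp
        rw [hdrop, ih r (List.reverse [c, '0', '.'] ++ acc) hlen]
        simp [rep]
      · simp only [hpre]
        rw [if_neg (by simp)]
        have hlen : t.length ≤ n := by
          simp only [List.length_cons] at h
          omega
        rw [ih t (a :: acc) hlen]
        cases t with
        | nil => simp [rep]
        | cons b t' =>
          have hnot : ¬ (a = c ∧ b = '.') := by
            intro ⟨h1, h2⟩
            subst h1; subst h2
            simp [List.isPrefixOf] at hpre
          simp [rep, hnot]

theorem replace_eq_rep (c : Char) (l : List Char) :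
    PySem.Chars.replace l [c, '.'] [c, '0', '.'] = rep c l := by
  rw [PySem.Chars.replace]
  rw [if_neg (by simp)]
  rw [go_eq_rep c l.length l [] (le_refl _)]
  simp

theorem replace_eq_gpass (c : Char) (hc : c ≠ '.') (l : List Char) :
    PySem.Chars.replace l [c, '.'] [c, '0', '.'] = gpass [c] none l := by
  rw [replace_eq_rep, gpass_eq_rep c hc]
  simp

theorem gpass_comp (c : Char) (S : List Char) (_hS : c ∉ S) (_hdot : c ≠ '.') (hzero : c ≠ '0') :
    ∀ (l : List Char) (p : Option Char),
      gpass [c] p (gpass S p l) = gpass (c :: S) p l := by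
  intro l
  induction l with
  | nil => intro p; simp [gpass]
  | cons a t ih =>
    intro p
    by_cases hin : (a == '.' && p.elim false (fun x => S.contains x)) = true
    · -- inner pass inserts: a = '.', p = some s with s ∈ S
      have ha : a = '.' := by
        rcases Bool.and_eq_true .. |>.mp hin with ⟨h1, -⟩
        simpa using h1
      subst ha
      rw [gpass_cons_pos _ _ _ _ hin]
      rw [gpass_cons_neg [c] p '0' _ (by cases p <;> simp)]
      rw [gpass_cons_neg [c] (some '0') '.' _ (by simp [Ne.symm hzero])]
      rw [ih (some '.')]
      rw [gpass_cons_pos (c :: S) p '.' t (by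
        rcases Bool.and_eq_true .. |>.mp hin with ⟨-, h2⟩
        cases p with
        | none => simp at h2
        | some x => simp at h2 ⊢; exact Or.inr h2)]
    · -- inner pass does not insert
      have hin' : (a == '.' && p.elim false (fun x => S.contains x)) = false := by
        simpa using hin
      rw [gpass_cons_neg _ _ _ _ hin']
      by_cases hout : (a == '.' && p.elim false (fun x => List.contains [c] x)) = true
      · -- outer pass inserts at a: a = '.', p = some c
        have ha : a = '.' := by
          rcases Bool.and_eq_true .. |>.mp hout with ⟨h1, -⟩
          simpa using h1
        subst ha
        have hp : p = some c := by
          rcases Bool.and_eq_true .. |>.mp hout with ⟨-, h2⟩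
          cases p with
          | none => simp at h2
          | some x => simp at h2; rw [h2]
        subst hp
        rw [gpass_cons_pos _ _ _ _ hout]
        rw [ih (some '.')]
        rw [gpass_cons_pos (c :: S) (some c) '.' t (by simp)]
      · -- no insert anywhere
        have hout' : (a == '.' && p.elim false (fun x => List.contains [c] x)) = false := by
          simpa using hout
        rw [gpass_cons_neg _ _ _ _ hout']
        rw [ih (some a)]
        rw [gpass_cons_neg (c :: S) p a t (by
          cases p with
          | none => simp
          | some x =>
            simp only [Option.elim_some, List.contains_cons] at *
            by_cases hax : a = '.'
            · subst hax
              simp only [beq_self_eq_true, Bool.true_and] at hin' hout' ⊢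
              simp_all
            · simp [hax])]

theorem gpass_congr (S₁ S₂ : List Char) (h : ∀ x, S₁.contains x = S₂.contains x) :
    ∀ (l : List Char) (p : Option Char), gpass S₁ p l = gpass S₂ p l := by
  intro l
  induction l with
  | nil => intro p; simp [gpass]
  | cons a t ih =>
    intro p
    have hsame : Option.elim p false (fun x => S₁.contains x)
               = Option.elim p false (fun x => S₂.contains x) := by
      cases p with
      | none => rfl
      | some x => exact h x
    simp only [gpass, hsame, ih]

theorem fdGo_eq_gpass : ∀ (l : List Char) (x : Char), fdGo (some x) l = gpass fdOps (some x) l := by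
  intro l
  induction l with
  | nil => intro x; rfl
  | cons a t ih =>
    intro x
    simp only [fdGo, gpass, fdCond, Option.isNone_some, Bool.false_or, ih a]

-- ===== VERDICT (by name: the statement is the Claim_ definition above) =====
theorem fix_decimals_spec : Claim_equal_fix_decimals := by
  intro input _hdom hpre
  unfold Spec_fix_decimals fix_decimals fix_decimals_alt
  have hl : input.toList ≠ [] := by
    intro h
    exact hpre (by simpa using congrArg String.ofList h)
  cases hlist : input.toList with
  | nil => exact absurd hlist hl
  | cons a t =>
    apply String.toList_injective
    -- left side: unfold the fold of six replaces, rewrite each as a one-character pass, fuse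
    simp only [List.foldl_cons, List.foldl_nil]
    simp only [PySem.Str.toList_replace]
    have hget : PySem.Str.pyGet? input 0 = PySem.List.pyGet? (a :: t) 0 := by
      simp [hlist]
    rw [show ("+.".toList) = ['+','.'] from rfl, show ("+0.".toList) = ['+','0','.'] from rfl,
        show ("*.".toList) = ['*','.'] from rfl, show ("*0.".toList) = ['*','0','.'] from rfl,
        show ("/.".toList) = ['/','.'] from rfl, show ("/0.".toList) = ['/','0','.'] from rfl,
        show ("-.".toList) = ['-','.'] from rfl, show ("-0.".toList) = ['-','0','.'] from rfl,
        show ("(.".toList) = ['(','.'] from rfl, show ("(0.".toList) = ['(','0','.'] from rfl,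
        show (").".toList) = [')','.'] from rfl, show (")0.".toList) = [')','0','.'] from rfl]
    rw [replace_eq_gpass '+' (by decide), replace_eq_gpass '*' (by decide),
        replace_eq_gpass '/' (by decide), replace_eq_gpass '-' (by decide),
        replace_eq_gpass '(' (by decide), replace_eq_gpass ')' (by decide)]
    rw [gpass_comp '*' ['+'] (by decide) (by decide) (by decide),
        gpass_comp '/' ['*','+'] (by decide) (by decide) (by decide),
        gpass_comp '-' ['/','*','+'] (by decide) (by decide) (by decide),
        gpass_comp '(' ['-','/','*','+'] (by decide) (by decide) (by decide),
        gpass_comp ')' ['(','-','/','*','+'] (by decide) (by decide) (by decide)]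
    rw [gpass_congr [')','(','-','/','*','+'] fdOps
      (by intro x; rw [Bool.eq_iff_iff]; simp [fdOps]; tauto)]
    rw [String.toList_ofList]
    -- now both sides are single passes over (possibly prepended) a :: t
    by_cases ha : a = '.'
    · subst ha
      rw [if_pos (by rw [hget]; simp : PySem.Str.pyGet? input 0 = some '.')]
      rw [show ("0" ++ input).toList = '0' :: '.' :: t by rw [String.toList_append, hlist]; rfl]
      rw [gpass_cons_neg fdOps none '0' _ (by simp)]
      rw [gpass_cons_neg fdOps (some '0') '.' _ (by simp [fdOps])]
      rw [show fdGo none ('.' :: t) = '0' :: '.' :: fdGo (some '.') t by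
        simp [fdGo, fdCond]]
      rw [fdGo_eq_gpass]
    · rw [if_neg (by rw [hget]; simp [ha])]
      rw [hlist]
      rw [gpass_cons_neg fdOps none a t (by simp)]
      rw [show fdGo none (a :: t) = a :: fdGo (some a) t by
        simp [fdGo, fdCond, ha]]
      rw [fdGo_eq_gpass]
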